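-- pv_equiv track=rewrite | github.com/HSZemi/mccommands | mccommands.py | sub_build_cstring
-- ===== SOURCE A (Python) =====
-- def escape(string):
-- 	string = string.replace("\\", "\\\\")
-- 	string = string.replace('"', '\\"')
-- 	return string
--
-- def sub_build_cstring(commands):
-- 	if(len(commands) > 0):
-- 		string = 'Block:"command_block",Time:1,TileEntityData:{Command:"'
-- 		string += escape(str(commands.pop()))
-- 		string += '"},Passengers:[{id:falling_block,Block:"redstone_block",Time:1,Passengers:[{id: falling_block,'
-- 		string += sub_build_cstring(commands)
-- 		string += '}]}]'
-- 		return string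
-- 	else:
-- 		return 'Block:"air",Time:1'
-- ===== SOURCE B (Python) =====
-- def escape(string):
-- 	string = string.replace("\\", "\\\\")
-- 	string = string.replace('"', '\\"')
-- 	return string
--
-- def sub_build_cstring(commands):
-- 	pieces = []
-- 	while commands:
-- 		pieces.append(escape(str(commands.pop())))
-- 	result = 'Block:"air",Time:1'
-- 	for cmd in reversed(pieces):
-- 		result = ('Block:"command_block",Time:1,TileEntityData:{Command:"' + cmd
-- 			+ '"},Passengers:[{id:falling_block,Block:"redstone_block",Time:1,Passengers:[{id: falling_block,'
-- 			+ result + '}]}]')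
-- 	return result
-- ===== Notes on version B (the rewrite author's own statement) =====
-- stated objective: alternative
-- what changed: Replaces A's recursion (which re-enters itself mid-string) by two explicit passes: a pop loop that collects escaped commands, then an inside-out fold that wraps the base string from the first original element outward; same pop-to-empty mutation of the argument.
import Mathlib
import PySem

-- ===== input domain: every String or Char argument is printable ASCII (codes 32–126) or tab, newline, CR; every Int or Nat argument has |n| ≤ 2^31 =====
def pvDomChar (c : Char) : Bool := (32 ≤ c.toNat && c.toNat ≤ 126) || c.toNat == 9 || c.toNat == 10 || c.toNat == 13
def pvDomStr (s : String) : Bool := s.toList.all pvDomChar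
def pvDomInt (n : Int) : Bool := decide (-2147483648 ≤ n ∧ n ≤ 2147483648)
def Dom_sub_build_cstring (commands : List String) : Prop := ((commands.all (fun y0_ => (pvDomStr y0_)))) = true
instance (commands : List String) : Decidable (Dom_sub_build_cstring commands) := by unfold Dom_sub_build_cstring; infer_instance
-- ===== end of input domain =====

-- Both programs observably empty their `commands` argument in Python; the equivalence proved here is about the return value.
-- B builds the same nested string iteratively (pop loop + inside-out fold) instead of by recursion; objective: alternative decomposition.

-- ===== PORT A =====
def pvEscape (s : String) : String :=
  PySem.Str.replace (PySem.Str.replace s "\\" "\\\\") "\"" "\\\""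

def sub_build_cstring (commands : List String) : String :=
  if h : commands.length > 0 then
    let string := "Block:\"command_block\",Time:1,TileEntityData:{Command:\""
    -- commands.pop() = last element; recursion continues on the list without it
    let string := string ++ pvEscape (commands.getLast (by cases commands <;> simp_all))
    let string := string ++ "\"},Passengers:[{id:falling_block,Block:\"redstone_block\",Time:1,Passengers:[{id: falling_block,"
    let string := string ++ sub_build_cstring commands.dropLast
    string ++ "}]}]"
  else
    "Block:\"air\",Time:1"
termination_by commands.length
decreasing_by simpa using Nat.sub_lt h Nat.one_pos

-- ===== PORT B =====
-- the `while commands: pieces.append(escape(commands.pop()))` loop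
def pvPopLoop (commands : List String) (pieces : List String) : List String :=
  if h : commands ≠ [] then
    pvPopLoop commands.dropLast (pieces ++ [pvEscape (commands.getLast h)])
  else
    pieces
termination_by commands.length
decreasing_by simpa using Nat.sub_lt (List.length_pos_of_ne_nil h) Nat.one_pos

def sub_build_cstring_alt (commands : List String) : String :=
  let pieces := pvPopLoop commands []
  pieces.reverse.foldl
    (fun result cmd =>
      "Block:\"command_block\",Time:1,TileEntityData:{Command:\"" ++ cmd
        ++ "\"},Passengers:[{id:falling_block,Block:\"redstone_block\",Time:1,Passengers:[{id: falling_block,"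
        ++ result ++ "}]}]")
    "Block:\"air\",Time:1"

-- ===== PRECONDITION & SPEC =====
def Spec_sub_build_cstring (commands : List String) (out : String) : Prop := out = sub_build_cstring_alt commands
instance (commands : List String) (out : String) : Decidable (Spec_sub_build_cstring commands out) := by unfold Spec_sub_build_cstring; infer_instance

-- ===== CLAIM (what is proved, stated in full; the proofs are below) =====
def Claim_equal_sub_build_cstring : Prop := ∀ (commands : List String), Dom_sub_build_cstring commands → Spec_sub_build_cstring commands (sub_build_cstring commands)

-- ===== LEMMAS AND PROOFS =====

theorem pvPopLoop_eq (commands pieces : List String) :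
    pvPopLoop commands pieces = pieces ++ commands.reverse.map pvEscape := by
  induction commands using List.reverseRecOn generalizing pieces with
  | nil => simp [pvPopLoop]
  | append_singleton ys y ih =>
      rw [pvPopLoop]
      simp [ih]

theorem sub_build_cstring_eq_alt (commands : List String) :
    sub_build_cstring commands = sub_build_cstring_alt commands := by
  induction commands using List.reverseRecOn with
  | nil => simp [sub_build_cstring, sub_build_cstring_alt, pvPopLoop]
  | append_singleton ys y ih =>
      rw [sub_build_cstring]
      simp only [sub_build_cstring_alt, pvPopLoop_eq] at *
      simp [ih]

-- ===== VERDICT (by name: the statement is the Claim_ definition above) =====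
theorem sub_build_cstring_spec : Claim_equal_sub_build_cstring := by
  intro commands _
  exact sub_build_cstring_eq_alt commands
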